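-- pv_equiv track=rewrite | github.com/SMMM25/RF-Arsenal--OS-V2.0 | core/fpga/stealth_fpga.py | generate_frequency_band
-- ===== SOURCE A (Python) =====
-- from typing import Any, Callable, Dict, List, Optional, Tuple
--
-- def generate_frequency_band(
--
--     start_freq: int,
--     end_freq: int,
--     channel_spacing: int
-- ) -> List[int]:
--     """
--     Generate frequency list for a band
--
--     Args:
--         start_freq: Start frequency in Hz
--         end_freq: End frequency in Hz
--         channel_spacing: Channel spacing in Hz
--
--     Returns:
--         List of channel frequencies
--     """
--     frequencies = []
--     freq = start_freq
--
--     while freq <= end_freq: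
--         frequencies.append(freq)
--         freq += channel_spacing
--
--     return frequencies
-- ===== SOURCE B (Python) =====
-- def generate_frequency_band(
--     start_freq: int,
--     end_freq: int,
--     channel_spacing: int
-- ):
--     if end_freq < start_freq:
--         return []
--     n = (end_freq - start_freq) // channel_spacing + 1
--     return [start_freq + i * channel_spacing for i in range(n)]
-- ===== Notes on version B (the rewrite author's own statement) =====
-- stated objective: idiomatic
-- what changed: Replaced the accumulate-and-compare while loop by a precomputed channel count n = (end-start)//spacing + 1 and a range comprehension with index arithmetic.
import Mathlib
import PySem

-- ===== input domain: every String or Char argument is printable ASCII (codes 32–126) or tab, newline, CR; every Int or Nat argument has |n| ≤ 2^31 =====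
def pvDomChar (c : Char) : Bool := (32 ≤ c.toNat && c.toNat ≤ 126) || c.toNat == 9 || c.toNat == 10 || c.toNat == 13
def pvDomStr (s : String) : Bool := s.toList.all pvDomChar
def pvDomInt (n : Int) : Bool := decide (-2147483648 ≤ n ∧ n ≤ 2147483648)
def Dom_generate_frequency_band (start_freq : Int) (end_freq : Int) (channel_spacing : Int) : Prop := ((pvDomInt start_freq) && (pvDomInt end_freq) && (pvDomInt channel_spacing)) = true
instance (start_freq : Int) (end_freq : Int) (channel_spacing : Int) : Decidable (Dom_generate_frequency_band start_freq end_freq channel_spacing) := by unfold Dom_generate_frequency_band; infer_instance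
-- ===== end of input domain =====

-- B replaces A's accumulate-and-compare while loop with a precomputed channel count
-- and a range comprehension (idiomatic; same cost).

-- ===== PORT A =====
-- the while loop of A; the '0 < channel_spacing' conjunct only makes the recursion
-- total (Python diverges there; such inputs are excluded by Pre_)
def genFBLoop (end_freq channel_spacing : Int) (freq : Int) (acc : List Int) : List Int :=
  if _h : freq ≤ end_freq ∧ 0 < channel_spacing then
    genFBLoop end_freq channel_spacing (freq + channel_spacing) (acc ++ [freq])
  else acc
termination_by (end_freq + 1 - freq).toNat
decreasing_by omega

def generate_frequency_band (start_freq : Int) (end_freq : Int) (channel_spacing : Int) : List Int :=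
  genFBLoop end_freq channel_spacing start_freq []

-- ===== PORT B =====
def generate_frequency_band_alt (start_freq : Int) (end_freq : Int) (channel_spacing : Int) : List Int :=
  if end_freq < start_freq then []
  else
    let n : Int := PySem.Int.floordiv (end_freq - start_freq) channel_spacing + 1
    (List.range n.toNat).map (fun i : Nat => start_freq + (i : Int) * channel_spacing)

-- ===== PRECONDITION & SPEC =====
-- Pre_ excludes only the inputs on which A never returns (the while loop diverges
-- when channel_spacing ≤ 0 and start_freq ≤ end_freq; Python B raises ZeroDivisionError
-- there when channel_spacing = 0).
def Pre_generate_frequency_band (start_freq : Int) (end_freq : Int) (channel_spacing : Int) : Prop :=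
  0 < channel_spacing ∨ end_freq < start_freq
instance (start_freq : Int) (end_freq : Int) (channel_spacing : Int) : Decidable (Pre_generate_frequency_band start_freq end_freq channel_spacing) := by unfold Pre_generate_frequency_band; infer_instance

def pvWitness_generate_frequency_band : Int × Int × Int := (100, 130, 10)

def Spec_generate_frequency_band (start_freq : Int) (end_freq : Int) (channel_spacing : Int) (out : List Int) : Prop := out = generate_frequency_band_alt start_freq end_freq channel_spacing
instance (start_freq : Int) (end_freq : Int) (channel_spacing : Int) (out : List Int) : Decidable (Spec_generate_frequency_band start_freq end_freq channel_spacing out) := by unfold Spec_generate_frequency_band; infer_instance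

-- ===== CLAIM (what is proved, stated in full; the proofs are below) =====
def Claim_equal_generate_frequency_band : Prop := ∀ (start_freq : Int) (end_freq : Int) (channel_spacing : Int), Dom_generate_frequency_band start_freq end_freq channel_spacing → Pre_generate_frequency_band start_freq end_freq channel_spacing → Spec_generate_frequency_band start_freq end_freq channel_spacing (generate_frequency_band start_freq end_freq channel_spacing)

-- ===== LEMMAS AND PROOFS =====

-- loop invariant: with positive spacing the loop appends exactly the closed-form list
lemma genFBLoop_eq (e sp : Int) (hsp : 0 < sp) :
    ∀ f acc, genFBLoop e sp f acc
      = acc ++ (List.range ((e - f) / sp + 1).toNat).map (fun i : Nat => f + (i : Int) * sp) := by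
  intro f acc
  induction f, acc using genFBLoop.induct e sp with
  | case1 f acc h ih =>
      rw [genFBLoop, dif_pos h]
      rw [ih]
      have hstep : (e - f) / sp = (e - (f + sp)) / sp + 1 := by
        have : e - f = (e - (f + sp)) + 1 * sp := by ring
        rw [this, Int.add_mul_ediv_right _ _ (by omega : sp ≠ 0)]
      have hge : 0 ≤ (e - (f + sp)) / sp + 1 := by
        have h1 : (-sp) / sp ≤ (e - (f + sp)) / sp :=
          Int.ediv_le_ediv hsp (by omega)
        have h2 : (-sp) / sp = -1 := by
          rw [show (-sp) = (-1) * sp by ring, Int.mul_ediv_cancel _ (by omega)]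
        omega
      have hn : ((e - f) / sp + 1).toNat = ((e - (f + sp)) / sp + 1).toNat + 1 := by
        omega
      rw [hn, List.range_succ_eq_map, List.map_cons, List.map_map]
      simp only [Nat.cast_zero, zero_mul, add_zero, List.append_assoc,
        List.singleton_append]
      congr 1
      congr 1
      apply List.map_congr_left
      intro i _
      simp only [Function.comp_apply, Nat.cast_succ]
      ring
  | case2 f acc h =>
      rw [genFBLoop, dif_neg h]
      have hfe : e < f := by
        by_contra hc
        exact h ⟨by omega, hsp⟩
      have hneg : (e - f) / sp < 0 := by
        by_contra hc
        have := (Int.le_ediv_iff_mul_le hsp).mp (by omega : (0:Int) ≤ (e - f) / sp)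
        omega
      have : ((e - f) / sp + 1).toNat = 0 := by omega
      simp [this]

-- ===== VERDICT (by name: the statement is the Claim_ definition above) =====
theorem generate_frequency_band_spec : Claim_equal_generate_frequency_band := by
  intro s e sp _hdom hpre
  unfold Spec_generate_frequency_band generate_frequency_band generate_frequency_band_alt
  by_cases hes : e < s
  · rw [genFBLoop, dif_neg (fun hc => absurd hc.1 (by omega)), if_pos hes]
  · have hsp : 0 < sp := by
      unfold Pre_generate_frequency_band at hpre
      rcases hpre with h | h
      · exact h
      · omega
    rw [genFBLoop_eq e sp hsp s [], if_neg hes,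
      PySem.Int.floordiv_eq_ediv_of_pos hsp]
    simp
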